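-- pv_equiv track=rewrite | github.com/BangSungjoon/Algorithm_Study | chw/week1-17/week16/43162/sol.py | solution
-- ===== SOURCE A (Python) =====
-- def solution(n, computers):
--     for i in range(n):
--         for j in range(i+1,n):
--             if computers[i][j] == 1:
--                 computers[j][i] = 1
--                 computers[i][j] = 1
--
--
--     cnt = 0
--     for i in range(n):
--         for j in range(0, i):
--             if computers[i][j] == 1:
--                 cnt += 1
--
--
--
--     answer = n - cnt
--     return answer
-- ===== SOURCE B (Python) =====
-- def solution(n, computers):
--     edges = set()
--     for i in range(n):
--         for j in range(n):
--             if j != i and computers[i][j] == 1: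
--                 edges.add((i, j) if i < j else (j, i))
--     return n - len(edges)
-- ===== Notes on version B (the rewrite author's own statement) =====
-- stated objective: alternative
-- what changed: A runs two staged triangular passes, first symmetrizing the matrix in place and then counting the lower triangle; B keeps a different data structure: one scan over all off-diagonal entries inserts each edge's normalized (min,max) index pair into a set, and the answer is n minus the set's size (return value only: B does not reproduce A's in-place writes to computers).
import Mathlib
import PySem

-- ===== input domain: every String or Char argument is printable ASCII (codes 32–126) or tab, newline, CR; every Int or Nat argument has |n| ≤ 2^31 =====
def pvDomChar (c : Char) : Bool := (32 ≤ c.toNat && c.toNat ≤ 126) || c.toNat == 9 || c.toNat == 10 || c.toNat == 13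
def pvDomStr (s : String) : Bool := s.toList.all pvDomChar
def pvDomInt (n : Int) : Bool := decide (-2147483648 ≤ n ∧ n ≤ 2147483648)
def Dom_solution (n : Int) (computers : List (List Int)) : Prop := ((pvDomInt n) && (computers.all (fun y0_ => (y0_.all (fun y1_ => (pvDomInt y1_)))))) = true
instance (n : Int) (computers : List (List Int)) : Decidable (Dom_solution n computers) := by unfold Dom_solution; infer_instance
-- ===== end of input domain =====

-- B replaces A's two staged triangular passes (in-place symmetrization, then a lower-triangle count) by a
-- different data structure: one scan of all off-diagonal entries collecting normalized (min,max) index pairs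
-- into a SET, answer = n - len(set); equivalence is about the RETURN value only (A mutates computers, B does not).

-- ===== PORT A =====
def pvGetA (m : List (List Int)) (i j : Int) : Int :=
  PySem.List.pyGetD (PySem.List.pyGetD m i []) j 0

def pvSetA (m : List (List Int)) (i j v : Int) : List (List Int) :=
  m.set i.toNat ((PySem.List.pyGetD m i []).set j.toNat v)

def solution (n : Int) (computers : List (List Int)) : Int :=
  let m1 := (PySem.List.pyRange 0 n 1).foldl (fun m i =>
    (PySem.List.pyRange (i+1) n 1).foldl (fun m j =>
      if pvGetA m i j == 1 then pvSetA (pvSetA m j i 1) i j 1 else m) m) computers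
  let cnt := (PySem.List.pyRange 0 n 1).foldl (fun c i =>
    (PySem.List.pyRange 0 i 1).foldl (fun c j =>
      if pvGetA m1 i j == 1 then c + 1 else c) c) (0 : Int)
  n - cnt

-- ===== PORT B =====
def solution_alt (n : Int) (computers : List (List Int)) : Int :=
  let edges : PySem.Set (Int × Int) :=
    (PySem.List.pyRange 0 n 1).foldl (fun s i =>
      (PySem.List.pyRange 0 n 1).foldl (fun s j =>
        if j != i && (pvGetA computers i j == 1)
        then PySem.Set.add s (if i < j then (i, j) else (j, i)) else s) s) PySem.Set.empty
  n - PySem.Set.len edges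

-- ===== PRECONDITION & SPEC =====
-- Pre_solution is exactly the inputs on which Python A returns (no IndexError): for n <= 1 A never indexes
-- computers; for n >= 2 A unconditionally reads rows 0..n-1, needing n columns in rows 0..n-2 but only
-- n-1 columns in the last row (it is only read at columns < n-1).
def Pre_solution (n : Int) (computers : List (List Int)) : Prop :=
  1 < n →
    n ≤ (computers.length : Int) ∧
    (∀ i ∈ List.range (n.toNat - 1), n ≤ ((computers.getD i []).length : Int)) ∧
    n - 1 ≤ ((computers.getD (n.toNat - 1) []).length : Int)
instance (n : Int) (computers : List (List Int)) : Decidable (Pre_solution n computers) := by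
  unfold Pre_solution; infer_instance

def pvWitness_solution : Int × List (List Int) := (3, [[0, 1, 0], [1, 0, 0], [0, 0, 0]])

def Spec_solution (n : Int) (computers : List (List Int)) (out : Int) : Prop := out = solution_alt n computers
instance (n : Int) (computers : List (List Int)) (out : Int) : Decidable (Spec_solution n computers out) := by unfold Spec_solution; infer_instance

-- ===== CLAIM (what is proved, stated in full; the proofs are below) =====
def Claim_equal_solution : Prop := ∀ (n : Int) (computers : List (List Int)), Dom_solution n computers → Pre_solution n computers → Spec_solution n computers (solution n computers)

-- ===== LEMMAS AND PROOFS =====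

def pvE (m : List (List Int)) (a b : Nat) : Int := (m.getD a []).getD b 0

def pvUpd (m : List (List Int)) (p : Int × Int) : List (List Int) :=
  if pvGetA m p.1 p.2 == 1 then pvSetA (pvSetA m p.2 p.1 1) p.1 p.2 1 else m

theorem pvGetA_eq (m : List (List Int)) (i j : Int) (hi : 0 ≤ i) (hj : 0 ≤ j) :
    pvGetA m i j = pvE m i.toNat j.toNat := by
  rw [pvGetA, PySem.List.pyGetD_of_nonneg m [] hi,
      PySem.List.pyGetD_of_nonneg _ (0 : Int) hj]; rfl

theorem pvGetD_set {α : Type} (l : List α) (n k : Nat) (x d : α) :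
    (l.set n x).getD k d = if n = k ∧ n < l.length then x else l.getD k d := by
  rcases eq_or_ne n k with rfl | h
  · by_cases hl : n < l.length <;>
      simp [List.getD_eq_getElem?_getD, hl]
  · simp [List.getD_eq_getElem?_getD, h]

theorem pvSetA_eq (m : List (List Int)) (i j v : Int) (hi : 0 ≤ i) :
    pvSetA m i j v = m.set i.toNat ((m.getD i.toNat []).set j.toNat v) := by
  rw [pvSetA, PySem.List.pyGetD_of_nonneg m [] hi]

theorem length_pvSetA (m : List (List Int)) (i j v : Int) :
    (pvSetA m i j v).length = m.length := by
  simp [pvSetA]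

theorem rowlen_pvSetA (m : List (List Int)) (i j v : Int) (hi : 0 ≤ i) (k : Nat) :
    ((pvSetA m i j v).getD k []).length = (m.getD k []).length := by
  rw [pvSetA_eq m i j v hi, pvGetD_set]
  split_ifs with h
  · rw [← h.1]; simp
  · rfl

theorem pvE_pvSetA (m : List (List Int)) (i j v : Int) (hi : 0 ≤ i) (a b : Nat) :
    pvE (pvSetA m i j v) a b =
      if a = i.toNat ∧ a < m.length ∧ b = j.toNat ∧ b < (m.getD a []).length then v
      else pvE m a b := by
  rw [pvSetA_eq m i j v hi]
  unfold pvE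
  rw [pvGetD_set]
  by_cases hA : i.toNat = a ∧ i.toNat < m.length
  · rw [if_pos hA]
    obtain ⟨ha, hl⟩ := hA
    subst ha
    rw [pvGetD_set]
    by_cases hB : j.toNat = b ∧ j.toNat < (m.getD i.toNat []).length
    · rw [if_pos hB, if_pos ⟨rfl, hl, hB.1.symm, hB.1 ▸ hB.2⟩]
    · rw [if_neg hB, if_neg]
      · rintro ⟨-, -, hb, hbl⟩; exact hB ⟨hb.symm, hb ▸ hbl⟩
  · rw [if_neg hA, if_neg]
    rintro ⟨ha, hl, -, -⟩; exact hA ⟨ha.symm, ha ▸ hl⟩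

theorem length_pvUpd (m : List (List Int)) (p : Int × Int) :
    (pvUpd m p).length = m.length := by
  unfold pvUpd; split_ifs <;> simp [length_pvSetA]

theorem rowlen_pvUpd (m : List (List Int)) (p : Int × Int) (h1 : 0 ≤ p.1) (h2 : 0 ≤ p.2) (k : Nat) :
    ((pvUpd m p).getD k []).length = (m.getD k []).length := by
  unfold pvUpd; split_ifs with h
  · rw [rowlen_pvSetA _ _ _ _ h1, rowlen_pvSetA _ _ _ _ h2]
  · rfl

theorem pvE_pvUpd (m : List (List Int)) (x y : Int) (hx : 0 ≤ x) (hxy : x < y)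
    (k1 : x.toNat < m.length) (k2 : y.toNat < m.length)
    (k3 : y.toNat < (m.getD x.toNat []).length) (k4 : x.toNat < (m.getD y.toNat []).length)
    (a b : Nat) :
    pvE (pvUpd m (x, y)) a b =
      if a = y.toNat ∧ b = x.toNat ∧ pvE m x.toNat y.toNat = 1 then 1 else pvE m a b := by
  have hy : (0:Int) ≤ y := le_trans hx (le_of_lt hxy)
  have hne : x.toNat ≠ y.toNat := by omega
  unfold pvUpd
  simp only [pvGetA_eq m x y hx hy]
  by_cases hv : pvE m x.toNat y.toNat = 1
  · rw [if_pos (by simpa using hv)]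
    rw [pvE_pvSetA _ _ _ _ hx, pvE_pvSetA _ _ _ _ hy,
        length_pvSetA, rowlen_pvSetA _ _ _ _ hy]
    by_cases hA : a = x.toNat
    · subst hA
      by_cases hB : b = y.toNat
      · subst hB
        rw [if_pos ⟨rfl, k1, rfl, k3⟩, if_neg (by rintro ⟨h, -⟩; exact hne h)]
        exact hv.symm
      · rw [if_neg (by rintro ⟨-, -, h, -⟩; exact hB h),
            if_neg (by rintro ⟨h, -⟩; exact hne h),
            if_neg (by rintro ⟨h, -⟩; exact hne h)]
    · rw [if_neg (by rintro ⟨h, -⟩; exact hA h)]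
      by_cases hC : a = y.toNat ∧ b = x.toNat
      · obtain ⟨rfl, rfl⟩ := hC
        rw [if_pos ⟨rfl, k2, rfl, k4⟩, if_pos ⟨rfl, rfl, hv⟩]
      · rw [if_neg (by rintro ⟨h1, -, h2, -⟩; exact hC ⟨h1, h2⟩),
            if_neg (by rintro ⟨h1, h2, -⟩; exact hC ⟨h1, h2⟩)]
  · rw [if_neg (by simpa using hv), if_neg (by rintro ⟨-, -, h⟩; exact hv h)]

def pvOK (m : List (List Int)) (p : Int × Int) : Prop :=
  0 ≤ p.1 ∧ p.1 < p.2 ∧ p.1.toNat < m.length ∧ p.2.toNat < m.length ∧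
    p.2.toNat < (m.getD p.1.toNat []).length ∧ p.1.toNat < (m.getD p.2.toNat []).length

theorem fold_pvUpd_char :
    ∀ (L : List (Int × Int)) (m : List (List Int)), (∀ p ∈ L, pvOK m p) →
      ((L.foldl pvUpd m).length = m.length ∧
       (∀ k, ((L.foldl pvUpd m).getD k []).length = (m.getD k []).length)) ∧
      (∀ a b : Nat, pvE (L.foldl pvUpd m) a b =
        if (((b : Int), (a : Int)) ∈ L ∧ pvE m b a = 1) then 1 else pvE m a b) := by
  intro L
  induction L with
  | nil => intro m _; refine ⟨⟨rfl, fun k => rfl⟩, fun a b => ?_⟩; simp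
  | cons p L ih =>
    intro m hval
    obtain ⟨x, y⟩ := p
    obtain ⟨hx, hxy, k1, k2, k3, k4⟩ := hval (x, y) (List.mem_cons_self ..)
    have hy : (0:Int) ≤ y := le_trans hx (le_of_lt hxy)
    have hstep := pvE_pvUpd m x y hx hxy k1 k2 k3 k4
    have hlen : (pvUpd m (x, y)).length = m.length := length_pvUpd m (x, y)
    have hrow : ∀ k, ((pvUpd m (x, y)).getD k []).length = (m.getD k []).length :=
      rowlen_pvUpd m (x, y) hx hy
    have hval' : ∀ q ∈ L, pvOK (pvUpd m (x, y)) q := by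
      intro q hq
      obtain ⟨a1, a2, a3, a4, a5, a6⟩ := hval q (List.mem_cons_of_mem _ hq)
      exact ⟨a1, a2, by rw [hlen]; exact a3, by rw [hlen]; exact a4,
             by rw [hrow]; exact a5, by rw [hrow]; exact a6⟩
    obtain ⟨⟨ihlen, ihrow⟩, ihE⟩ := ih (pvUpd m (x, y)) hval'
    rw [List.foldl_cons]
    refine ⟨⟨by rw [ihlen, hlen], fun k => by rw [ihrow, hrow]⟩, fun a b => ?_⟩
    rw [ihE]
    have hne : x.toNat ≠ y.toNat := by omega
    by_cases hP : ((b : Int), (a : Int)) = (x, y)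
    · have hbx : b = x.toNat := by
        have := congrArg Prod.fst hP; dsimp at this; omega
      have hay : a = y.toNat := by
        have := congrArg Prod.snd hP; dsimp at this; omega
      subst hbx; subst hay
      rw [hP]
      simp only [hstep]
      by_cases hQ : pvE m x.toNat y.toNat = 1 <;>
        simp [List.mem_cons, hQ, hne, Ne.symm hne]
    · have hLlt : ∀ q ∈ L, q.1 < q.2 := fun q hq =>
        (hval q (List.mem_cons_of_mem _ hq)).2.1
      simp only [hstep]
      have hmem_cons : ((((b:Int),(a:Int)) ∈ (x,y) :: L) ∧ pvE m b a = 1) ↔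
          ((((b:Int),(a:Int)) ∈ L) ∧ pvE m b a = 1) := by
        simp [List.mem_cons, hP]
      rw [if_congr hmem_cons rfl rfl]
      have h2 : ¬(a = y.toNat ∧ b = x.toNat ∧ pvE m x.toNat y.toNat = 1) := by
        rintro ⟨rfl, rfl, -⟩
        exact hP (by rw [Int.toNat_of_nonneg hx, Int.toNat_of_nonneg hy])
      by_cases hm : ((b:Int),(a:Int)) ∈ L
      · have h1 : ¬(b = y.toNat ∧ a = x.toNat) := by
          rintro ⟨rfl, rfl⟩
          have := hLlt _ hm
          dsimp at this; omega
        rw [if_neg (show ¬(b = y.toNat ∧ a = x.toNat ∧ pvE m x.toNat y.toNat = 1) from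
              fun h => h1 ⟨h.1, h.2.1⟩), if_neg h2]
      · simp [hm, h2]

def pvPairs (n : Int) : List (Int × Int) :=
  (PySem.List.pyRange 0 n 1).flatMap (fun i => (PySem.List.pyRange (i+1) n 1).map (fun j => (i, j)))

theorem mem_pvPairs (n x y : Int) : (x, y) ∈ pvPairs n ↔ 0 ≤ x ∧ x < y ∧ y < n := by
  simp only [pvPairs, List.mem_flatMap, List.mem_map, PySem.List.mem_pyRange_one, Prod.mk.injEq]
  constructor
  · rintro ⟨i, ⟨hi0, hin⟩, j, ⟨hj1, hjn⟩, rfl, rfl⟩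
    omega
  · rintro ⟨hx, hxy, hyn⟩
    exact ⟨x, ⟨hx, by omega⟩, y, ⟨by omega, hyn⟩, rfl, rfl⟩

-- the target list: normalized pairs (j, i), j < i < n, with an edge in either direction of the ORIGINAL matrix
def pvT (n : Int) (c : List (List Int)) : List (Int × Int) :=
  (PySem.List.pyRange 1 n 1).flatMap (fun i =>
    ((PySem.List.pyRange 0 i 1).filter (fun j =>
      pvGetA c i j == 1 || pvGetA c j i == 1)).map (fun j => (j, i)))

theorem mem_pvT (n : Int) (c : List (List Int)) (x : Int × Int) :
    x ∈ pvT n c ↔ 0 ≤ x.1 ∧ x.1 < x.2 ∧ x.2 < n ∧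
      (pvGetA c x.2 x.1 = 1 ∨ pvGetA c x.1 x.2 = 1) := by
  obtain ⟨a, b⟩ := x
  simp only [pvT, List.mem_flatMap, List.mem_map, List.mem_filter,
    PySem.List.mem_pyRange_one, Prod.mk.injEq, Bool.or_eq_true, beq_iff_eq]
  constructor
  · rintro ⟨i, ⟨hi1, hin⟩, j, ⟨⟨hj0, hji⟩, hc⟩, rfl, rfl⟩
    exact ⟨hj0, hji, hin, hc⟩
  · rintro ⟨h1, h2, h3, h4⟩
    exact ⟨b, ⟨by omega, h3⟩, a, ⟨⟨h1, h2⟩, h4⟩, rfl, rfl⟩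

theorem nodup_pvT (n : Int) (c : List (List Int)) : (pvT n c).Nodup := by
  rw [pvT, List.nodup_flatMap]
  constructor
  · intro i _
    exact (List.Nodup.filter _ (PySem.List.nodup_pyRange_one 0 i)).map
      (fun a b h => (Prod.mk.injEq ..).mp h |>.1)
  · have := PySem.List.pairwise_lt_pyRange_one 1 n
    refine this.imp ?_
    intro a b hab
    rw [Function.onFun, List.disjoint_left]
    rintro ⟨u, v⟩ hu hv
    simp only [List.mem_map, List.mem_filter, Prod.mk.injEq] at hu hv
    obtain ⟨_, _, -, rfl⟩ := hu
    obtain ⟨_, _, -, rfl⟩ := hv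
    omega

theorem foldl_nested {α β γ : Type} (L : List α) (f : α → List β) (g : γ → α × β → γ) (init : γ) :
    L.foldl (fun s a => (f a).foldl (fun s b => g s (a, b)) s) init
      = (L.flatMap (fun a => (f a).map (fun b => (a, b)))).foldl g init := by
  induction L generalizing init with
  | nil => rfl
  | cons h t ih =>
    simp only [List.foldl_cons, List.flatMap_cons, List.foldl_append, List.foldl_map]
    rw [ih]

theorem foldl_count {α : Type} (q : α → Bool) (L : List α) : ∀ (c : Int),
    L.foldl (fun acc p => if q p then acc + 1 else acc) c = c + (L.countP q : Int) := by
  induction L with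
  | nil => intro c; simp
  | cons h t ih =>
    intro c
    rw [List.foldl_cons, ih, List.countP_cons]
    by_cases hq : q h
    · simp [hq]; omega
    · simp [hq]

-- B-side: a conditional-add fold over any list builds a Nodup set whose members are the images of the accepted elements
theorem foldl_add_char {α β : Type} [BEq β] [LawfulBEq β] (cond : α → Bool) (key : α → β) :
    ∀ (L : List α) (s : PySem.Set β), s.Nodup →
      (L.foldl (fun s p => if cond p then PySem.Set.add s (key p) else s) s).Nodup ∧
      (∀ x, x ∈ L.foldl (fun s p => if cond p then PySem.Set.add s (key p) else s) s ↔
            x ∈ s ∨ ∃ p ∈ L, cond p ∧ x = key p) := by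
  intro L
  induction L with
  | nil => intro s hs; exact ⟨hs, fun x => by simp⟩
  | cons p L ih =>
    intro s hs
    rw [List.foldl_cons]
    by_cases hc : cond p
    · rw [if_pos hc]
      obtain ⟨h1, h2⟩ := ih (PySem.Set.add s (key p)) (PySem.Set.nodup_add s (key p) hs)
      refine ⟨h1, fun x => ?_⟩
      rw [h2 x, PySem.Set.mem_add]
      constructor
      · rintro ((h | rfl) | ⟨q, hq, hcq, rfl⟩)
        · exact Or.inl h
        · exact Or.inr ⟨p, List.mem_cons_self .., hc, rfl⟩
        · exact Or.inr ⟨q, List.mem_cons_of_mem _ hq, hcq, rfl⟩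
      · rintro (h | ⟨q, hq, hcq, rfl⟩)
        · exact Or.inl (Or.inl h)
        · rcases List.mem_cons.mp hq with rfl | hq
          · exact Or.inl (Or.inr rfl)
          · exact Or.inr ⟨q, hq, hcq, rfl⟩
    · rw [if_neg hc]
      obtain ⟨h1, h2⟩ := ih s hs
      refine ⟨h1, fun x => ?_⟩
      rw [h2 x]
      constructor
      · rintro (h | ⟨q, hq, hcq, rfl⟩)
        · exact Or.inl h
        · exact Or.inr ⟨q, List.mem_cons_of_mem _ hq, hcq, rfl⟩
      · rintro (h | ⟨q, hq, hcq, rfl⟩)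
        · exact Or.inl h
        · rcases List.mem_cons.mp hq with rfl | hq
          · exact absurd hcq hc
          · exact Or.inr ⟨q, hq, hcq, rfl⟩

-- B computes n - |pvT n c| for EVERY input (B never needs any bound on the matrix)
theorem alt_eq (n : Int) (c : List (List Int)) :
    solution_alt n c = n - ((pvT n c).length : Int) := by
  rw [solution_alt]
  rw [show (fun (s : PySem.Set (Int × Int)) (i : Int) =>
        (PySem.List.pyRange 0 n 1).foldl (fun s j =>
          if j != i && (pvGetA c i j == 1)
          then PySem.Set.add s (if i < j then (i, j) else (j, i)) else s) s)
      = (fun s i => (PySem.List.pyRange 0 n 1).foldl (fun s j =>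
          (fun s (p : Int × Int) => if p.2 != p.1 && (pvGetA c p.1 p.2 == 1)
            then PySem.Set.add s (if p.1 < p.2 then p else (p.2, p.1)) else s) s (i, j)) s)
      from rfl]
  rw [foldl_nested (PySem.List.pyRange 0 n 1) (fun _ => PySem.List.pyRange 0 n 1)
        (fun s (p : Int × Int) => if p.2 != p.1 && (pvGetA c p.1 p.2 == 1)
          then PySem.Set.add s (if p.1 < p.2 then p else (p.2, p.1)) else s) PySem.Set.empty]
  obtain ⟨hnd, hmem⟩ := foldl_add_char
    (fun p : Int × Int => p.2 != p.1 && (pvGetA c p.1 p.2 == 1))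
    (fun p : Int × Int => if p.1 < p.2 then p else (p.2, p.1))
    ((PySem.List.pyRange 0 n 1).flatMap (fun i => (PySem.List.pyRange 0 n 1).map (fun j => (i, j))))
    PySem.Set.empty (List.nodup_nil)
  have hsame : ∀ x, x ∈ ((PySem.List.pyRange 0 n 1).flatMap
      (fun i => (PySem.List.pyRange 0 n 1).map (fun j => (i, j)))).foldl
        (fun s p => if p.2 != p.1 && (pvGetA c p.1 p.2 == 1)
          then PySem.Set.add s (if p.1 < p.2 then p else (p.2, p.1)) else s) PySem.Set.empty
      ↔ x ∈ pvT n c := by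
    intro x
    rw [hmem x, mem_pvT]
    simp only [PySem.Set.empty, List.not_mem_nil, false_or, List.mem_flatMap, List.mem_map,
      PySem.List.mem_pyRange_one, Bool.and_eq_true, bne_iff_ne, beq_iff_eq]
    constructor
    · rintro ⟨p, ⟨i, ⟨hi0, hin⟩, j, ⟨hj0, hjn⟩, rfl⟩, ⟨hne, hval⟩, rfl⟩
      dsimp only at hne hval ⊢
      by_cases hlt : i < j
      · rw [if_pos hlt]
        exact ⟨hi0, hlt, hjn, Or.inr hval⟩
      · rw [if_neg hlt]
        exact ⟨hj0, by omega, hin, Or.inl hval⟩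
    · rintro ⟨h1, h2, h3, (hv | hv)⟩
      · refine ⟨(x.2, x.1), ⟨x.2, ⟨by omega, h3⟩, x.1, ⟨h1, by omega⟩, rfl⟩,
          ⟨by dsimp; omega, hv⟩, ?_⟩
        dsimp
        rw [if_neg (by omega)]
      · refine ⟨(x.1, x.2), ⟨x.1, ⟨h1, by omega⟩, x.2, ⟨by omega, h3⟩, rfl⟩,
          ⟨by dsimp; omega, hv⟩, ?_⟩
        dsimp
        rw [if_pos h2]
  have hperm := (List.perm_ext_iff_of_nodup hnd (nodup_pvT n c)).mpr hsame
  simp only [PySem.Set.len, hperm.length_eq]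

-- A-side: the count over the symmetrized matrix is |pvT n c|
theorem pv_count_eq (n : Int) (c M : List (List Int)) (h2n : 1 < n)
    (hM : ∀ a b : Nat, pvE M a b =
      if (((b : Int), (a : Int)) ∈ pvPairs n ∧ pvE c b a = 1) then 1 else pvE c a b) :
    ((PySem.List.pyRange 0 n 1).flatMap
        (fun i => (PySem.List.pyRange 0 i 1).map (fun j => (i, j)))).countP
        (fun p => pvGetA M p.1 p.2 == 1)
      = (pvT n c).length := by
  rw [List.countP_flatMap, pvT, List.length_flatMap]
  rw [show PySem.List.pyRange 0 n 1 = 0 :: PySem.List.pyRange 1 n 1 from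
        PySem.List.pyRange_one_cons (by omega)]
  rw [List.map_cons]
  have h0 : (List.countP (fun p => pvGetA M p.1 p.2 == 1) ∘
      fun i => (PySem.List.pyRange 0 i 1).map (fun j => (i, j))) 0 = 0 := by
    simp [PySem.List.pyRange_one_eq_nil]
  rw [h0]
  rw [List.sum_cons, Nat.zero_add]
  congr 1
  apply List.map_congr_left
  intro i hi
  rw [PySem.List.mem_pyRange_one] at hi
  simp only [Function.comp_apply]
  rw [List.countP_map, List.length_map, ← List.countP_eq_length_filter]
  apply List.countP_congr
  intro j hj
  rw [PySem.List.mem_pyRange_one] at hj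
  have hi0 : (0:Int) ≤ i := by omega
  have hj0 : (0:Int) ≤ j := by omega
  rw [Function.comp_apply]
  rw [show pvGetA M i j = pvE M i.toNat j.toNat from pvGetA_eq M i j hi0 hj0]
  rw [hM i.toNat j.toNat]
  rw [Int.toNat_of_nonneg hi0, Int.toNat_of_nonneg hj0]
  rw [if_congr (iff_of_eq (congrArg (· ∧ pvE c j.toNat i.toNat = 1)
        (eq_true ((mem_pvPairs n j i).mpr ⟨hj0, by omega, by omega⟩)))) rfl rfl]
  rw [show pvGetA c i j = pvE c i.toNat j.toNat from pvGetA_eq c i j hi0 hj0,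
      show pvGetA c j i = pvE c j.toNat i.toNat from pvGetA_eq c j i hj0 hi0]
  by_cases hq : pvE c j.toNat i.toNat = 1 <;> simp [hq]

theorem pv_cntA (n : Int) (M : List (List Int)) :
    (PySem.List.pyRange 0 n 1).foldl (fun acc i =>
        (PySem.List.pyRange 0 i 1).foldl (fun acc j =>
          if pvGetA M i j == 1 then acc + 1 else acc) acc) (0:Int)
    = (((PySem.List.pyRange 0 n 1).flatMap
          (fun i => (PySem.List.pyRange 0 i 1).map (fun j => (i, j)))).countP
          (fun p => pvGetA M p.1 p.2 == 1) : Int) := by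
  have h1 := foldl_nested (PySem.List.pyRange 0 n 1) (fun i => PySem.List.pyRange 0 i 1)
      (fun acc (p : Int × Int) => if pvGetA M p.1 p.2 == 1 then acc + 1 else acc) (0:Int)
  exact h1.trans ((foldl_count _ _ 0).trans (by rw [Int.zero_add]))

theorem pv_main (n : Int) (c : List (List Int)) (hpre : Pre_solution n c) :
    solution n c = n - ((pvT n c).length : Int) := by
  simp only [solution]
  by_cases h2n : 1 < n
  · have hval : ∀ p ∈ pvPairs n, pvOK c p := by
      intro p hp
      obtain ⟨x, y⟩ := p
      rw [mem_pvPairs] at hp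
      obtain ⟨hx, hxy, hyn⟩ := hp
      obtain ⟨hlen, hrows, hlast⟩ := hpre h2n
      refine ⟨hx, hxy, by simp only; omega, by simp only; omega, ?_, ?_⟩
      · have := hrows x.toNat (List.mem_range.mpr (by omega))
        simp only; omega
      · by_cases hy : y < n - 1
        · have := hrows y.toNat (List.mem_range.mpr (by omega))
          simp only; omega
        · have hyn' : y.toNat = n.toNat - 1 := by omega
          simp only [hyn']
          omega
    obtain ⟨-, hchar⟩ := fold_pvUpd_char (pvPairs n) c hval
    have hm1 : (PySem.List.pyRange 0 n 1).foldl (fun m i =>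
        (PySem.List.pyRange (i+1) n 1).foldl (fun m j =>
          if pvGetA m i j == 1 then pvSetA (pvSetA m j i 1) i j 1 else m) m) c
        = (pvPairs n).foldl pvUpd c :=
      foldl_nested (PySem.List.pyRange 0 n 1) (fun i => PySem.List.pyRange (i+1) n 1) pvUpd c
    rw [hm1, pv_cntA n ((pvPairs n).foldl pvUpd c),
        pv_count_eq n c ((pvPairs n).foldl pvUpd c) h2n hchar]
  · have e1 : PySem.List.pyRange 1 n 1 = [] := PySem.List.pyRange_one_eq_nil (by omega)
    have eT : pvT n c = [] := by rw [pvT, e1]; rfl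
    rw [eT]
    by_cases h1n : n = 1
    · subst h1n
      have e2 : PySem.List.pyRange 0 1 1 = [0] := by
        rw [PySem.List.pyRange_one_cons (by norm_num)]; norm_num [e1]
      have e3 : PySem.List.pyRange 0 0 1 = [] := PySem.List.pyRange_one_eq_nil (le_refl 0)
      simp [e1, e2, e3]
    · have e0 : PySem.List.pyRange 0 n 1 = [] := PySem.List.pyRange_one_eq_nil (by omega)
      simp [e0]

-- ===== VERDICT (by name: the statement is the Claim_ definition above) =====
theorem solution_spec : Claim_equal_solution := by
  intro n computers _ hpre
  unfold Spec_solution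
  rw [alt_eq, pv_main n computers hpre]
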